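-- pv_equiv track=rewrite | github.com/eyereasoner/eye | learning/cases/learning_17.py | is_proth_prime
-- ===== SOURCE A (Python) =====
-- from math import isqrt
--
-- def is_prime(x: int) -> bool:
--     if x < 2:
--         return False
--     if x % 2 == 0:
--         return x == 2
--     r = isqrt(x)
--     f = 3
--     while f <= r:
--         if x % f == 0:
--             return False
--         f += 2
--     return True
--
-- def is_proth_prime(x: int):
--     # x = k*2^m + 1 with k odd and k < 2^m, and x prime
--     if not is_prime(x):
--         return False, None
--     for m in range(1, 64):
--         two_m = 1 << m
--         if (x - 1) % two_m == 0:
--             k = (x - 1) // two_m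
--             if k % 2 == 1 and k < two_m:
--                 return True, (k, m)
--     return False, None
-- ===== SOURCE B (Python) =====
-- from math import isqrt
--
-- def _is_prime(x: int) -> bool:
--     if x < 2:
--         return False
--     if x == 2:
--         return True
--     if x % 2 == 0:
--         return False
--     return all(x % f != 0 for f in range(3, isqrt(x) + 1, 2))
--
-- def is_proth_prime(x: int):
--     # x = k*2^m + 1 with k odd and k < 2^m, and x prime
--     if not _is_prime(x):
--         return False, None
--     # factor all twos out of x-1 once, instead of scanning candidate exponents
--     n = x - 1
--     m = 0
--     while n % 2 == 0:
--         n //= 2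
--         m += 1
--     k = n
--     if 1 <= m < 64 and k < (1 << m):
--         return True, (k, m)
--     return False, None
-- ===== Notes on version B (the rewrite author's own statement) =====
-- stated objective: simpler
-- what changed: Replaced the scan over candidate exponents m=1..63 (each testing (x-1) % 2^m and recomputing k) by a single pass that factors all twos out of x-1, then checks the unique decomposition k*2^m once; the helper primality trial division is expressed as all() over a range instead of a while loop.
import Mathlib
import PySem

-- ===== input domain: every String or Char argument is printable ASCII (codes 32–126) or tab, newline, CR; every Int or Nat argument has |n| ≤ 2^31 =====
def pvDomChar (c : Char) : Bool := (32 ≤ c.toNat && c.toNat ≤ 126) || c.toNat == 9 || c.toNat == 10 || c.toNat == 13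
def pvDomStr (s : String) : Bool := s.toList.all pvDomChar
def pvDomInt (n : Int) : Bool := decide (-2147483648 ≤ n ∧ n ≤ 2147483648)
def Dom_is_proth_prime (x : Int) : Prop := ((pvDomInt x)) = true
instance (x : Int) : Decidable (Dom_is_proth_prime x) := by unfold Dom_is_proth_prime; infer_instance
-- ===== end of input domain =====

-- B replaces A's scan over candidate exponents m (testing (x-1) % 2^m for each m) by a single
-- pass that factors all twos out of x-1, then checks the unique decomposition once (objective: simpler).

-- ===== PORT A =====

-- math.isqrt: exact for x ≥ 0 (the only way A calls it)
def pvIsqrt (x : Int) : Int := (Nat.sqrt x.toNat : Int)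

-- 'while f <= r: if x % f == 0: return False; f += 2'
-- (fuel is only a structural bound on the iteration count; the loop guard 'f ≤ r' is the Python's)
def isPrimeLoopA (x r : Int) : Nat → Int → Bool
  | 0, _ => true
  | fuel + 1, f =>
    if f ≤ r then (if x % f = 0 then false else isPrimeLoopA x r fuel (f + 2)) else true

def is_prime_a (x : Int) : Bool :=
  if x < 2 then false
  else if x % 2 = 0 then decide (x = 2)
  else isPrimeLoopA x (pvIsqrt x) (pvIsqrt x).toNat 3

-- 'for m in range(1, 64): …' with the early return (fuel 63 = the 63 iterations of range(1, 64))
def prothLoopA (x : Int) : Nat → Int → Bool × (Option (Int × Int))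
  | 0, _ => (false, none)
  | fuel + 1, m =>
    if m < 64 then
      let two_m : Int := 2 ^ m.toNat          -- 1 << m (m ≥ 1 at every call)
      if (x - 1) % two_m = 0 then
        let k := PySem.Int.floordiv (x - 1) two_m
        if k % 2 = 1 ∧ k < two_m then (true, some (k, m)) else prothLoopA x fuel (m + 1)
      else prothLoopA x fuel (m + 1)
    else (false, none)

def is_proth_prime (x : Int) : Bool × (Option (Int × Int)) :=
  if ¬ is_prime_a x then (false, none) else prothLoopA x 63 1

-- ===== PORT B =====

def is_prime_b (x : Int) : Bool :=
  if x < 2 then false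
  else if x = 2 then true
  else if x % 2 = 0 then false
  else (PySem.List.pyRange 3 (pvIsqrt x + 1) 2).all (fun f => x % f != 0)

-- 'while n % 2 == 0: n //= 2; m += 1'  (fuel bounds the halvings; B runs this with n ≥ 1)
def valLoopB : Nat → Int → Int → Int × Int
  | 0, n, m => (n, m)
  | fuel + 1, n, m =>
    if n % 2 = 0 then valLoopB fuel (PySem.Int.floordiv n 2) (m + 1) else (n, m)

def is_proth_prime_alt (x : Int) : Bool × (Option (Int × Int)) :=
  if ¬ is_prime_b x then (false, none)
  else
    let km := valLoopB (x - 1).toNat (x - 1) 0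
    let k := km.1
    let m := km.2
    if 1 ≤ m ∧ m < 64 ∧ k < 2 ^ m.toNat then (true, some (k, m)) else (false, none)

-- ===== PRECONDITION & SPEC =====
def Spec_is_proth_prime (x : Int) (out : Bool × (Option (Int × Int))) : Prop := out = is_proth_prime_alt x
instance (x : Int) (out : Bool × (Option (Int × Int))) : Decidable (Spec_is_proth_prime x out) := by unfold Spec_is_proth_prime; infer_instance

-- ===== CLAIM (what is proved, stated in full; the proofs are below) =====
def Claim_equal_is_proth_prime : Prop := ∀ (x : Int), Dom_is_proth_prime x → Spec_is_proth_prime x (is_proth_prime x)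

-- ===== LEMMAS AND PROOFS =====

theorem pyRange_two_cons (a b : Int) (h : a < b) :
    PySem.List.pyRange a b 2 = a :: PySem.List.pyRange (a + 2) b 2 := by
  rw [PySem.List.pyRange_of_pos _ _ (by omega : (0:Int) < 2),
      PySem.List.pyRange_of_pos _ _ (by omega : (0:Int) < 2)]
  by_cases h2 : a + 2 < b
  · have : ((b - a + 2 - 1) / 2).toNat = ((b - (a + 2) + 2 - 1) / 2).toNat + 1 := by omega
    rw [if_pos h, if_pos h2, this, List.range_succ_eq_map]
    simp [List.map_map, Function.comp]
    intro k _
    ring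
  · have : ((b - a + 2 - 1) / 2).toNat = 1 := by omega
    rw [if_pos h, if_neg h2, this]
    simp

theorem pyRange_two_nil (a b : Int) (h : b ≤ a) : PySem.List.pyRange a b 2 = [] := by
  rw [PySem.List.pyRange_of_pos _ _ (by omega : (0:Int) < 2), if_neg (by omega)]
  simp

theorem isPrimeLoopA_eq_all (x r : Int) : ∀ (fuel : Nat) (f : Int), (r + 1 - f).toNat ≤ fuel →
    isPrimeLoopA x r fuel f = (PySem.List.pyRange f (r + 1) 2).all (fun v => x % v != 0) := by
  intro fuel
  induction fuel with
  | zero =>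
    intro f hf
    rw [isPrimeLoopA, pyRange_two_nil _ _ (by omega)]
    simp
  | succ fuel ih =>
    intro f hf
    rw [isPrimeLoopA]
    by_cases h : f ≤ r
    · rw [if_pos h, pyRange_two_cons _ _ (by omega)]
      by_cases hx : x % f = 0
      · simp [hx]
      · rw [if_neg hx, List.all_cons]
        have hb : (x % f != 0) = true := by simp [hx]
        rw [hb, Bool.true_and]
        exact ih (f + 2) (by omega)
    · rw [if_neg h, pyRange_two_nil _ _ (by omega)]
      simp

theorem prime_eq (x : Int) : is_prime_a x = is_prime_b x := by
  unfold is_prime_a is_prime_b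
  by_cases h1 : x < 2
  · simp [h1]
  · by_cases h2 : x = 2
    · subst h2; norm_num
    · by_cases h3 : x % 2 = 0
      · simp [h1, h2, h3]
      · simp only [if_neg h1, if_neg h2, if_neg h3]
        exact isPrimeLoopA_eq_all x (pvIsqrt x) (pvIsqrt x).toNat 3 (by
          have : 0 ≤ pvIsqrt x := by unfold pvIsqrt; positivity
          omega)

theorem prime_two_le {x : Int} (h : is_prime_a x = true) : 2 ≤ x := by
  unfold is_prime_a at h
  by_cases h1 : x < 2
  · simp [h1] at h
  · omega

theorem valLoopB_eq (v : Nat) : ∀ (fuel : Nat) (k m : Int), v ≤ fuel → 0 < k → k % 2 = 1 →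
    valLoopB fuel (k * 2 ^ v) m = (k, m + v) := by
  induction v with
  | zero =>
    intro fuel k m _ hk hodd
    cases fuel with
    | zero => rw [valLoopB]; simp
    | succ fuel => rw [valLoopB, if_neg (by omega)]; simp
  | succ v ih =>
    intro fuel k m hfuel hk hodd
    cases fuel with
    | zero => omega
    | succ fuel =>
      rw [valLoopB, if_pos (by
        have : (2:Int) ∣ k * 2 ^ (v + 1) :=
          Dvd.dvd.mul_left (dvd_pow_self 2 (Nat.succ_ne_zero v)) k
        omega)]
      have h2 : PySem.Int.floordiv (k * 2 ^ (v + 1)) 2 = k * 2 ^ v := by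
        rw [PySem.Int.floordiv_eq_ediv_of_pos (by omega : (0:Int) < 2)]
        rw [pow_succ, ← mul_assoc]
        exact Int.mul_ediv_cancel _ (by omega)
      rw [h2, ih fuel k (m + 1) (by omega) hk hodd]
      congr 1
      push_cast
      ring

theorem exists_val_aux (N : Nat) : ∀ n : Int, n.toNat ≤ N → 0 < n → ∃ v : Nat, ∃ k : Int,
    0 < k ∧ k % 2 = 1 ∧ n = k * 2 ^ v := by
  induction N with
  | zero => intro n h1 h2; omega
  | succ N ih =>
    intro n h1 h2
    by_cases h : n % 2 = 1
    · exact ⟨0, n, h2, h, by ring⟩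
    · obtain ⟨v, k, hk, hodd, heq⟩ := ih (n / 2) (by omega) (by omega)
      exact ⟨v + 1, k, hk, hodd, by rw [pow_succ, ← mul_assoc, ← heq]; omega⟩

theorem exists_val (n : Int) (hn : 0 < n) : ∃ v : Nat, ∃ k : Int,
    0 < k ∧ k % 2 = 1 ∧ n = k * 2 ^ v :=
  exists_val_aux n.toNat n le_rfl hn

-- 2^a ∣ k * 2^v ↔ a ≤ v, for odd k
theorem dvd_pow_mul_odd {k : Int} (hodd : k % 2 = 1) (v a : Nat) :
    ((2:Int) ^ a ∣ k * 2 ^ v) ↔ a ≤ v := by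
  constructor
  · intro hd
    by_contra hlt
    push_neg at hlt
    have h2 : (2:Int) ^ a = 2 ^ v * 2 ^ (a - v) := by
      rw [← pow_add]; congr 1; omega
    rw [h2] at hd
    obtain ⟨c, hc⟩ := hd
    have hx : (2:Int) ^ (a - v) ∣ k := by
      refine ⟨c, mul_left_cancel₀ (by positivity : ((2:Int) ^ v) ≠ 0) ?_⟩
      calc (2:Int) ^ v * k = k * 2 ^ v := mul_comm _ _
        _ = 2 ^ v * 2 ^ (a - v) * c := hc
        _ = 2 ^ v * (2 ^ (a - v) * c) := by ring
    have h21 : (2:Int) ∣ 2 ^ (a - v) := dvd_pow_self 2 (by omega)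
    have : (2:Int) ∣ k := h21.trans hx
    omega
  · intro hle
    exact Dvd.dvd.mul_left (pow_dvd_pow 2 hle) k

theorem prothLoopA_eq (k : Int) (v : Nat) (hk : 0 < k) (hodd : k % 2 = 1) (hv : v ≤ 31)
    (x : Int) (hx : x - 1 = k * 2 ^ v) : ∀ (fuel : Nat) (m : Int), 1 ≤ m → (64 - m).toNat ≤ fuel →
    prothLoopA x fuel m = if (m ≤ (v:Int) ∧ k < 2 ^ v) then (true, some (k, (v:Int))) else (false, none) := by
  intro fuel
  induction fuel with
  | zero =>
    intro m hm hfuel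
    rw [prothLoopA, if_neg (fun h => absurd h.1 (by omega))]
  | succ fuel ih =>
    intro m hm hfuel
    rw [prothLoopA]
    by_cases hm64 : m < 64
    · rw [if_pos hm64]
      simp only [hx]
      have hdvd : (k * 2 ^ v % 2 ^ m.toNat = 0) ↔ (m.toNat ≤ v) := by
        rw [PySem.Int.emod_eq_zero_iff_dvd]
        exact dvd_pow_mul_odd hodd v m.toNat
      by_cases hle : m.toNat ≤ v
      · rw [if_pos (hdvd.mpr hle)]
        have hkd : PySem.Int.floordiv (k * 2 ^ v) (2 ^ m.toNat) = k * 2 ^ (v - m.toNat) := by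
          rw [PySem.Int.floordiv_eq_ediv_of_pos (by positivity)]
          have : k * 2 ^ v = k * 2 ^ (v - m.toNat) * 2 ^ m.toNat := by
            rw [mul_assoc, ← pow_add]; congr 2; omega
          rw [this, Int.mul_ediv_cancel _ (by positivity)]
        rw [hkd]
        by_cases heq : m.toNat = v
        · subst heq
          simp only [Nat.sub_self, pow_zero, mul_one]
          by_cases hksm : k < 2 ^ m.toNat
          · rw [if_pos ⟨hodd, hksm⟩, if_pos ⟨by omega, hksm⟩]
            have hmv : m = ((m.toNat : Nat) : Int) := by omega
            rw [← hmv]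
          · rw [if_neg (fun h => hksm h.2),
                ih (m + 1) (by omega) (by omega),
                if_neg (fun h => absurd h.1 (by omega)), if_neg (fun h => hksm h.2)]
        · have hlt : m.toNat < v := by omega
          have hev : (k * 2 ^ (v - m.toNat)) % 2 = 0 := by
            have : (2:Int) ∣ k * 2 ^ (v - m.toNat) :=
              Dvd.dvd.mul_left (dvd_pow_self 2 (by omega : v - m.toNat ≠ 0)) k
            omega
          rw [if_neg (fun h => by omega),
              ih (m + 1) (by omega) (by omega)]
          by_cases hkv : k < 2 ^ v
          · rw [if_pos ⟨by omega, hkv⟩, if_pos ⟨by omega, hkv⟩]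
          · rw [if_neg (fun h => hkv h.2), if_neg (fun h => hkv h.2)]
      · rw [if_neg (fun h => hle (hdvd.mp h)),
            ih (m + 1) (by omega) (by omega),
            if_neg (fun h => absurd h.1 (by omega)), if_neg (fun h => absurd h.1 (by omega))]
    · rw [if_neg hm64, if_neg (fun h => absurd h.1 (by omega))]

-- ===== VERDICT (by name: the statement is the Claim_ definition above) =====
theorem is_proth_prime_spec : Claim_equal_is_proth_prime := by
  unfold Claim_equal_is_proth_prime Spec_is_proth_prime
  intro x hdom
  unfold is_proth_prime is_proth_prime_alt
  rw [← prime_eq]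
  by_cases hp : is_prime_a x
  · simp only [hp, not_true_eq_false, if_false]
    have hx2 : 2 ≤ x := prime_two_le hp
    have hxd : x ≤ 2147483648 := by
      have := hdom; unfold Dom_is_proth_prime pvDomInt at this
      simp at this; omega
    obtain ⟨v, k, hk, hodd, heq⟩ := exists_val (x - 1) (by omega)
    have hv31 : v ≤ 31 := by
      by_contra hgt
      push_neg at hgt
      have h1 : (2:Int) ^ 32 ≤ 2 ^ v := pow_le_pow_right₀ (by omega) (by omega)
      have h2 : (2:Int) ^ v ≤ k * 2 ^ v := le_mul_of_one_le_left (by positivity) (by omega)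
      have : (2:Int) ^ 32 ≤ x - 1 := by rw [heq]; linarith
      norm_num at this; omega
    rw [prothLoopA_eq k v hk hodd hv31 x heq 63 1 (by omega) (by omega)]
    have hfuel : v ≤ (x - 1).toNat := by
      have hvp : (v : Int) < 2 ^ v := by exact_mod_cast Nat.lt_two_pow_self
      have h2 : (2:Int) ^ v ≤ k * 2 ^ v := le_mul_of_one_le_left (by positivity) (by omega)
      omega
    have hval : valLoopB (x - 1).toNat (x - 1) 0 = (k, (v:Int)) := by
      rw [heq] at hfuel ⊢
      rw [valLoopB_eq v _ k 0 hfuel hk hodd]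
      simp
    simp only [hval]
    by_cases hc : 1 ≤ (v:Int) ∧ k < 2 ^ v
    · rw [if_pos ⟨hc.1, hc.2⟩, if_pos ⟨hc.1, by omega, by simpa using hc.2⟩]
    · rw [if_neg hc, if_neg (fun h => hc ⟨h.1, by simpa using h.2.2⟩)]
  · simp [hp]
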